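-- pv_equiv track=rewrite | github.com/nboley/grit | utilities/group_transcripts_by_reference.py | find_associated_genes
-- ===== SOURCE A (Python) =====
-- def find_associated_genes( trans, intron_to_gene_name ):
--     # genes which are associated with every bndry
--     fully_assoc_genes = set()
--     # genes associated with *any* bndry
--     genes = set()
--
--     # initialize the gene sets with genes from the first boundary
--     first_bndry = trans[1][1]
--     if first_bndry in intron_to_gene_name:
--         genes.update( intron_to_gene_name[ first_bndry ] )
--         fully_assoc_genes.update( intron_to_gene_name[ first_bndry ] )
--
--     # for a gene to be fully associated it has to be associated with *every*
--     # boundary, so we take the intersection. to be associated, it has to be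
--     # associated with any, so we take the union
--     for bndry in trans[1][2:-1]:
--         if bndry in intron_to_gene_name:
--             assoc_genes = intron_to_gene_name[ bndry ]
--             genes.update( assoc_genes )
--             if len( assoc_genes ) > 0:
--                 fully_assoc_genes.intersection_update(
--                     intron_to_gene_name[ bndry ])
--
--     return tuple(sorted(fully_assoc_genes)), tuple(sorted(genes))
-- ===== SOURCE B (Python) =====
-- from collections import Counter
--
-- def find_associated_genes(trans, intron_to_gene_name):
--     bndries = trans[1]
--     first_bndry = bndries[1]
--
--     # union: every gene associated with any considered boundary
--     genes = set()
--     for bndry in [first_bndry] + bndries[2:-1]: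
--         if bndry in intron_to_gene_name:
--             genes.update(intron_to_gene_name[bndry])
--
--     # count table: a gene is fully associated iff it is counted once per
--     # required boundary (the first boundary always counts as required)
--     counts = Counter(set(intron_to_gene_name.get(first_bndry, ())))
--     required = 1
--     for bndry in bndries[2:-1]:
--         if bndry in intron_to_gene_name and len(intron_to_gene_name[bndry]) > 0:
--             required += 1
--             counts.update(set(intron_to_gene_name[bndry]))
--     fully_assoc_genes = {g for g, c in counts.items() if c == required}
--
--     return tuple(sorted(fully_assoc_genes)), tuple(sorted(genes))
-- ===== Notes on version B (the rewrite author's own statement) =====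
-- stated objective: alternative
-- what changed: Replaces the running set-intersection for fully-associated genes by a Counter keyed per gene with a required-boundary count (gene kept iff counted once per required boundary), and computes the union as a single loop over the concatenated boundary list; Pre_ excludes only inputs where A raises IndexError (fewer than two transcript rows or fewer than two boundaries in trans[1]), where B raises too.
import Mathlib
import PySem

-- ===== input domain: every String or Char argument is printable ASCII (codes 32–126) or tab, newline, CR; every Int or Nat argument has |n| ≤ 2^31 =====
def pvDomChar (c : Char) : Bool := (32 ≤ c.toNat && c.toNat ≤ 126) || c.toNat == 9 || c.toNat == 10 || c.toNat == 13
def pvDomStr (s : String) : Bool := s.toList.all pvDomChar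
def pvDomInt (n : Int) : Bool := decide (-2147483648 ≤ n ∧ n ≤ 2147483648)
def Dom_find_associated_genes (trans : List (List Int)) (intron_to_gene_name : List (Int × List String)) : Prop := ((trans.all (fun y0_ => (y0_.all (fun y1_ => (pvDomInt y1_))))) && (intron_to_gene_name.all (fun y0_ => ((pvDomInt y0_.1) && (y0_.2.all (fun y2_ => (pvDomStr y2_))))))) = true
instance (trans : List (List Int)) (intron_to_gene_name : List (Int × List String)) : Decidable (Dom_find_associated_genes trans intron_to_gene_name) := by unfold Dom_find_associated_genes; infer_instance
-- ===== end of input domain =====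

-- B replaces A's running set-intersection by a per-gene count table (gene fully
-- associated iff counted once per required boundary) and computes the union in one
-- loop over the concatenated boundary list; alternative decomposition, same cost.

-- ===== PORT A =====
-- loop body of A's 'for bndry in trans[1][2:-1]' (state = (fully_assoc_genes, genes))
def pvStepA (d : PySem.Dict Int (List String)) (p : PySem.Set String × PySem.Set String) (bndry : Int) : PySem.Set String × PySem.Set String :=
  if d.contains bndry then
    let assoc_genes := d.getD bndry []
    let genes := PySem.Set.update p.2 assoc_genes
    let fully := if 0 < assoc_genes.length then PySem.Set.inter p.1 assoc_genes else p.1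
    (fully, genes)
  else p

def find_associated_genes (trans : List (List Int)) (intron_to_gene_name : List (Int × List String)) : List (List String) :=
  let d := PySem.Dict.mk intron_to_gene_name
  let first_bndry := PySem.List.pyGetD (PySem.List.pyGetD trans 1 []) 1 0
  let init : PySem.Set String × PySem.Set String :=
    if d.contains first_bndry then
      (PySem.Set.update PySem.Set.empty (d.getD first_bndry []),
       PySem.Set.update PySem.Set.empty (d.getD first_bndry []))
    else (PySem.Set.empty, PySem.Set.empty)
  let st := (PySem.List.slice (PySem.List.pyGetD trans 1 []) (some 2) (some (-1))).foldl (pvStepA d) init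
  [PySem.List.sorted st.1 (fun x => x) false, PySem.List.sorted st.2 (fun x => x) false]

-- ===== PORT B =====
-- union loop body of B (over [first_bndry] + trans[1][2:-1])
def pvStepG (d : PySem.Dict Int (List String)) (s : PySem.Set String) (b : Int) : PySem.Set String :=
  if d.contains b then PySem.Set.update s (d.getD b []) else s

-- counter loop body of B (state = (counts, required))
def pvStepC (d : PySem.Dict Int (List String)) (p : PySem.Dict String Int × Int) (b : Int) : PySem.Dict String Int × Int :=
  if d.contains b ∧ 0 < (d.getD b []).length then
    ((PySem.Set.ofList (d.getD b [])).foldl (fun c g => c.modify g 0 (· + 1)) p.1, p.2 + 1)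
  else p

def find_associated_genes_alt (trans : List (List Int)) (intron_to_gene_name : List (Int × List String)) : List (List String) :=
  let d := PySem.Dict.mk intron_to_gene_name
  let bndries := PySem.List.pyGetD trans 1 []
  let first_bndry := PySem.List.pyGetD bndries 1 0
  let mid := PySem.List.slice bndries (some 2) (some (-1))
  let genes := (first_bndry :: mid).foldl (pvStepG d) PySem.Set.empty
  let st := mid.foldl (pvStepC d) (PySem.Dict.counter (PySem.Set.ofList (d.getD first_bndry [])), 1)
  let fully_assoc_genes := (st.1.items.filter (fun kv => kv.2 == st.2)).map Prod.fst
  [PySem.List.sorted fully_assoc_genes (fun x => x) false, PySem.List.sorted genes (fun x => x) false]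

-- ===== PRECONDITION & SPEC =====
-- Pre_ excludes exactly the inputs where A raises IndexError: trans[1][1] needs a
-- second row and a second element in it (B raises on the same inputs).
def Pre_find_associated_genes (trans : List (List Int)) (intron_to_gene_name : List (Int × List String)) : Prop :=
  2 ≤ trans.length ∧ 2 ≤ (trans.getD 1 []).length
instance (trans : List (List Int)) (intron_to_gene_name : List (Int × List String)) : Decidable (Pre_find_associated_genes trans intron_to_gene_name) := by unfold Pre_find_associated_genes; infer_instance

def pvWitness_find_associated_genes : List (List Int) × (List (Int × List String)) :=
  ([[0], [1, 2, 3]], [(2, ["geneA"])])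

def Spec_find_associated_genes (trans : List (List Int)) (intron_to_gene_name : List (Int × List String)) (out : List (List String)) : Prop := out = find_associated_genes_alt trans intron_to_gene_name
instance (trans : List (List Int)) (intron_to_gene_name : List (Int × List String)) (out : List (List String)) : Decidable (Spec_find_associated_genes trans intron_to_gene_name out) := by unfold Spec_find_associated_genes; infer_instance

-- ===== CLAIM (what is proved, stated in full; the proofs are below) =====
def Claim_equal_find_associated_genes : Prop := ∀ (trans : List (List Int)) (intron_to_gene_name : List (Int × List String)), Dom_find_associated_genes trans intron_to_gene_name → Pre_find_associated_genes trans intron_to_gene_name → Spec_find_associated_genes trans intron_to_gene_name (find_associated_genes trans intron_to_gene_name)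

-- ===== LEMMAS AND PROOFS =====

-- the condition under which A intersects / B counts a middle boundary
def pvAct (d : PySem.Dict Int (List String)) (b : Int) : Bool :=
  d.contains b && decide (0 < (d.getD b []).length)

-- A's pair fold: second component is B's union fold
theorem pvA_snd (d : PySem.Dict Int (List String)) (mid : List Int) :
    ∀ p : PySem.Set String × PySem.Set String,
      (mid.foldl (pvStepA d) p).2 = mid.foldl (pvStepG d) p.2 := by
  induction mid with
  | nil => intro p; rfl
  | cons b t ih =>
    intro p
    simp only [List.foldl_cons]
    rw [ih]
    congr 1
    simp only [pvStepA, pvStepG]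
    split <;> rfl

-- A's pair fold: membership in the first component
theorem pvA_fst_mem (d : PySem.Dict Int (List String)) (mid : List Int) :
    ∀ (p : PySem.Set String × PySem.Set String) (g : String),
      g ∈ (mid.foldl (pvStepA d) p).1 ↔
        g ∈ p.1 ∧ ∀ b ∈ mid, pvAct d b = true → g ∈ d.getD b [] := by
  induction mid with
  | nil => intro p g; simp
  | cons b t ih =>
    intro p g
    simp only [List.foldl_cons, ih, List.forall_mem_cons]
    simp only [pvStepA, pvAct]
    by_cases hc : d.contains b = true
    · by_cases hl : 0 < (d.getD b []).length
      · simp [hc, hl, PySem.Set.mem_inter]; try tauto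
      · simp [hc, hl]; try tauto
    · simp [hc]; try tauto

-- A's pair fold keeps the fully-associated set duplicate-free
theorem pvA_fst_nodup (d : PySem.Dict Int (List String)) (mid : List Int) :
    ∀ p : PySem.Set String × PySem.Set String, p.1.Nodup → (mid.foldl (pvStepA d) p).1.Nodup := by
  induction mid with
  | nil => intro p h; exact h
  | cons b t ih =>
    intro p h
    simp only [List.foldl_cons]
    apply ih
    simp only [pvStepA]
    split
    · split
      · exact PySem.Set.nodup_inter _ _ h
      · exact h
    · exact h

-- B's counter fold: the required count and the per-gene count
theorem pvC_fold (d : PySem.Dict Int (List String)) (mid : List Int) :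
    ∀ (c : PySem.Dict String Int) (r : Int) (g : String),
      (mid.foldl (pvStepC d) (c, r)).2 = r + (mid.countP (pvAct d) : Int) ∧
      (mid.foldl (pvStepC d) (c, r)).1.getD g 0 =
        c.getD g 0 + (mid.countP (fun b => pvAct d b && decide (g ∈ d.getD b [])) : Int) := by
  induction mid with
  | nil => intro c r g; simp
  | cons b t ih =>
    intro c r g
    simp only [List.foldl_cons, List.countP_cons, pvStepC]
    by_cases hact : d.contains b = true ∧ 0 < (d.getD b []).length
    · have hb : pvAct d b = true := by simp [pvAct, hact.1, hact.2]
      rw [if_pos hact]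
      obtain ⟨h2, h1⟩ := ih ((PySem.Set.ofList (d.getD b [])).foldl (fun c g => c.modify g 0 (· + 1)) c) (r + 1) g
      constructor
      · rw [h2, hb]; simp only [if_pos]; push_cast; omega
      · rw [h1, PySem.Dict.getD_foldl_modify_add_one]
        have hcnt : (PySem.Set.ofList (d.getD b [])).count g =
            if g ∈ d.getD b [] then 1 else 0 := by
          rw [List.Nodup.count (PySem.Set.nodup_ofList _)]
          simp [PySem.Set.mem_ofList]
        rw [hcnt]
        by_cases hg : g ∈ d.getD b []
        · simp only [hg, if_pos, hb, decide_true, Bool.and_true, if_pos]; push_cast; omega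
        · simp only [hg, if_neg, hb, decide_false, Bool.and_false, not_false_iff]
          simp
    · have hb : pvAct d b = false := by
        rcases not_and_or.mp hact with h | h <;> simp [pvAct, h]
      rw [if_neg hact]
      obtain ⟨h2, h1⟩ := ih c r g
      constructor
      · rw [h2, hb]; simp
      · rw [h1, hb]; simp

-- B's counter fold keeps the key list duplicate-free
theorem pvC_keys_nodup (d : PySem.Dict Int (List String)) (mid : List Int) :
    ∀ (c : PySem.Dict String Int) (r : Int), c.keys.Nodup → (mid.foldl (pvStepC d) (c, r)).1.keys.Nodup := by
  induction mid with
  | nil => intro c r h; exact h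
  | cons b t ih =>
    intro c r h
    simp only [List.foldl_cons, pvStepC]
    split
    · apply ih
      rw [PySem.Dict.keys_foldl_modify (f := fun _ _ => (· + 1))]
      exact PySem.Set.nodup_update _ _ h
    · exact ih c r h

-- counting the boundaries a gene hits versus all active boundaries
theorem pvCount_le_iff (d : PySem.Dict Int (List String)) (g : String) (mid : List Int) :
    mid.countP (fun b => pvAct d b && decide (g ∈ d.getD b [])) ≤ mid.countP (pvAct d) ∧
    (mid.countP (fun b => pvAct d b && decide (g ∈ d.getD b [])) = mid.countP (pvAct d) ↔
      ∀ b ∈ mid, pvAct d b = true → g ∈ d.getD b []) := by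
  induction mid with
  | nil => simp
  | cons b t ih =>
    obtain ⟨hle, hiff⟩ := ih
    simp only [List.countP_cons, List.mem_cons]
    by_cases hact : pvAct d b = true
    · by_cases hg : g ∈ d.getD b []
      · constructor
        · simp [hact, hg]; omega
        · simp only [hact, hg, decide_true, Bool.and_self, if_pos]
          constructor
          · intro h
            have ht := hiff.mp (by omega)
            rintro b' (rfl | hb') ha
            · exact hg
            · exact ht b' hb' ha
          · intro h
            have := hiff.mpr (fun b' hb' ha => h b' (Or.inr hb') ha)
            omega
      · constructor
        · simp [hact, hg]; omega
        · simp only [hact, hg, decide_false, Bool.and_false, if_pos, if_neg, Bool.false_eq_true, not_false_iff]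
          constructor
          · intro h; omega
          · intro h; exact absurd (h b (Or.inl rfl) hact) hg
    · constructor
      · simp [hact]; omega
      · simp only [hact, Bool.false_and, if_neg, Bool.false_eq_true, not_false_iff]
        constructor
        · intro h
          have ht := hiff.mp h
          rintro b' (rfl | hb') ha
          · exact absurd ha hact
          · exact ht b' hb' ha
        · intro h; exact hiff.mpr (fun b' hb' ha => h b' (Or.inr hb') ha)

-- getD versus get? for a nonzero target value
theorem pvGetD_eq_iff (c : PySem.Dict String Int) (g : String) (r : Int) (hr : r ≠ 0) :
    c.get? g = some r ↔ c.getD g 0 = r := by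
  rw [PySem.Dict.getD_eq_get?_getD]
  cases h : c.get? g with
  | none => simp [Ne.symm hr]
  | some v => simp

-- the seed set: A's 'update(empty, …)' under the contains guard is B's set(get(…, ()))
theorem pvSeed_eq (d : PySem.Dict Int (List String)) (k : Int) :
    (if d.contains k then PySem.Set.update PySem.Set.empty (d.getD k []) else PySem.Set.empty) =
      PySem.Set.ofList (d.getD k []) := by
  by_cases h : d.contains k = true
  · rw [if_pos h, PySem.Set.ofList_eq_foldl]; rfl
  · rw [if_neg h, PySem.Dict.getD_of_not_contains d [] (by simpa using h)]; rfl

-- ===== VERDICT (by name: the statement is the Claim_ definition above) =====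
theorem find_associated_genes_spec : Claim_equal_find_associated_genes := by
  intro trans intron _hdom _hpre
  unfold Spec_find_associated_genes
  simp only [find_associated_genes, find_associated_genes_alt]
  set d := PySem.Dict.mk intron with hd
  set first := PySem.List.pyGetD (PySem.List.pyGetD trans 1 []) 1 0 with hfirst
  set mid := PySem.List.slice (PySem.List.pyGetD trans 1 []) (some 2) (some (-1)) with hmid
  set S1 := PySem.Set.ofList (d.getD first []) with hS1
  have hnd : S1.Nodup := by rw [hS1]; exact PySem.Set.nodup_ofList _
  have hinit : (if d.contains first then
      (PySem.Set.update PySem.Set.empty (d.getD first []), PySem.Set.update PySem.Set.empty (d.getD first []))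
    else (PySem.Set.empty, PySem.Set.empty)) = ((S1 : PySem.Set String), (S1 : PySem.Set String)) := by
    rw [hS1, ← pvSeed_eq d first]
    split <;> rfl
  rw [hinit]
  set st := mid.foldl (pvStepC d) (PySem.Dict.counter S1, 1) with hst
  set k := mid.countP (pvAct d) with hk
  have hreq : st.2 = 1 + (k : Int) := (pvC_fold d mid _ 1 "").1
  have hkeys : st.1.keys.Nodup := by
    apply pvC_keys_nodup
    rw [PySem.Dict.keys_counter]
    exact PySem.Set.nodup_ofList _
  congr 1
  -- fully-associated part
  · rw [PySem.List.sorted_id_eq_sorted_id_iff_perm]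
    apply (List.perm_ext_iff_of_nodup ?_ ?_).mpr
    · intro g
      rw [pvA_fst_mem]
      constructor
      · rintro ⟨hg, hall⟩
        have hgS : g ∈ S1 := hg
        have hcq := (pvCount_le_iff d g mid).2.mpr hall
        have hget : st.1.getD g 0 = st.2 := by
          rw [(pvC_fold d mid _ 1 g).2, hreq, PySem.Dict.getD_counter, hcq,
              List.Nodup.count hnd, if_pos hgS, ← hk]
          push_cast; omega
        have hs : st.1.get? g = some st.2 :=
          (pvGetD_eq_iff st.1 g st.2 (by rw [hreq]; positivity)).mpr hget
        simp only [List.mem_map, List.mem_filter]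
        exact ⟨(g, st.2), ⟨((PySem.Dict.get?_eq_some_iff_mem_items st.1 g st.2 hkeys).mp hs), by simp⟩, rfl⟩
      · intro hg
        simp only [List.mem_map, List.mem_filter] at hg
        obtain ⟨⟨g', c⟩, ⟨hmem, hc⟩, rfl⟩ := hg
        simp only [beq_iff_eq] at hc
        subst hc
        have hs : st.1.get? g' = some st.2 :=
          (PySem.Dict.get?_eq_some_iff_mem_items st.1 g' st.2 hkeys).mpr hmem
        have hget : st.1.getD g' 0 = st.2 :=
          (pvGetD_eq_iff st.1 g' st.2 (by rw [hreq]; positivity)).mp hs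
        rw [(pvC_fold d mid _ 1 g').2, hreq, PySem.Dict.getD_counter] at hget
        obtain ⟨hle, hiff⟩ := pvCount_le_iff d g' mid
        rw [← hk] at hle
        have hmemS1 : g' ∈ S1 := by
          by_contra hno
          rw [List.count_eq_zero_of_not_mem hno] at hget
          omega
        refine ⟨hmemS1, hiff.mp ?_⟩
        rw [List.Nodup.count hnd, if_pos hmemS1] at hget
        rw [hk] at hget hle
        omega
    · exact pvA_fst_nodup d mid _ hnd
    · apply List.Nodup.sublist (List.Sublist.map Prod.fst List.filter_sublist)
      simpa [PySem.Dict.keys] using hkeys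
  -- union part
  · congr 2
    rw [pvA_snd]
    simp only [List.foldl_cons]
    congr 1
    rw [hS1]
    have hstep : pvStepG d PySem.Set.empty first = PySem.Set.ofList (d.getD first []) := by
      simpa [pvStepG] using pvSeed_eq d first
    exact hstep.symm
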